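-- pv_equiv track=rewrite | github.com/Buraphaohm/OnTheRoad_test | Interval.py | Intersection_count
-- ===== SOURCE A (Python) =====
-- def Intersection_count(N, intervals):
--     # สร้างlistไว้เก็บ
--     endpoints = []
--
--     # แต่ละinterval เพิ่มจุดเริ่มและท้าย
--     for interval in intervals:
--         endpoints.append((interval[0], 1)) # จุดเริ่ม
--         endpoints.append((interval[1], -1)) # จุดท้าย
--
--     # เรียงลำดับ
--     endpoints.sort()
--
--     # นับจำนวนที่intersectและinterval
--     intersections = 0
--     open_intervals = 0
--
--     # loop
--     for endpoint, value in endpoints: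
--         open_intervals += value
--
--         # ถ้าซ้ำให้นับ
--         if open_intervals > 1:
--             intersections += 1
--
--     return intersections
-- ===== SOURCE B (Python) =====
-- def Intersection_count(N, intervals):
--     # Two-pointer merge over separately sorted start and end coordinates.
--     starts = sorted(iv[0] for iv in intervals)
--     ends = sorted(iv[1] for iv in intervals)
--     n = len(intervals)
--     intersections = 0
--     open_intervals = 0
--     i = 0
--     j = 0
--     while i < n or j < n:
--         if i == n or (j < n and ends[j] <= starts[i]):
--             open_intervals -= 1
--             j += 1
--         else:
--             open_intervals += 1
--             i += 1
--         if open_intervals > 1: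
--             intersections += 1
--     return intersections
-- ===== Notes on version B (the rewrite author's own statement) =====
-- stated objective: alternative
-- what changed: Instead of building one tagged (coordinate, +/-1) event list and tuple-sorting it, B sorts the start and end coordinates into two separate lists and sweeps them with a two-pointer merge (ends taken first on ties), maintaining the open counter directly.
import Mathlib
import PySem

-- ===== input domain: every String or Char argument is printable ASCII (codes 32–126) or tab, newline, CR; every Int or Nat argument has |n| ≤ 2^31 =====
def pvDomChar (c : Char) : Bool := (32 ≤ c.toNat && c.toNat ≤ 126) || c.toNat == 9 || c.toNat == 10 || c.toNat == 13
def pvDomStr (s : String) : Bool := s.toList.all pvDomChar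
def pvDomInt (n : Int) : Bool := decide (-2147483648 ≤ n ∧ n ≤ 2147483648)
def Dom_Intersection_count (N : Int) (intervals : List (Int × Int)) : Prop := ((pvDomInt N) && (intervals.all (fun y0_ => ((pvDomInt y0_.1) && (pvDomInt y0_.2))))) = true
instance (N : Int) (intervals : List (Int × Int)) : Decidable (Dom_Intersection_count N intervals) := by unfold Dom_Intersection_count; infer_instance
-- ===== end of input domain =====

-- B replaces A's single tuple-sorted (coordinate, ±1) event list by two separately
-- sorted coordinate lists swept with a two-pointer merge (objective: alternative).


-- ===== PORT A =====
def Intersection_count (N : Int) (intervals : List (Int × Int)) : Int :=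
  -- endpoints = []; for interval in intervals: append (start, 1) and (end, -1)
  let endpoints : List (Int × Int) :=
    intervals.foldl (fun acc iv => acc ++ [(iv.1, 1), (iv.2, -1)]) []
  -- endpoints.sort()  (Python tuple sort = lexicographic on (fst, snd))
  let sortedE := PySem.List.sorted2 endpoints Prod.fst Prod.snd false
  -- sweep counting positions where more than one interval is open
  (sortedE.foldl
    (fun (st : Int × Int) ev =>
      let o := st.2 + ev.2
      (if o > 1 then st.1 + 1 else st.1, o))
    (0, 0)).1

-- ===== PORT B =====
-- the while loop of Source B: recursion on the two remaining coordinate lists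
def pvMergeCount : List Int → List Int → Int → Int → Int
  | [], [], _, inter => inter
  | [], _ :: es', openIv, inter =>
      let o := openIv - 1
      pvMergeCount [] es' o (if o > 1 then inter + 1 else inter)
  | s :: ss', [], openIv, inter =>
      let o := openIv + 1
      pvMergeCount ss' [] o (if o > 1 then inter + 1 else inter)
  | s :: ss', e :: es', openIv, inter =>
      if e ≤ s then
        let o := openIv - 1
        pvMergeCount (s :: ss') es' o (if o > 1 then inter + 1 else inter)
      else
        let o := openIv + 1
        pvMergeCount ss' (e :: es') o (if o > 1 then inter + 1 else inter)
  termination_by ss es _ _ => ss.length + es.length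

def Intersection_count_alt (N : Int) (intervals : List (Int × Int)) : Int :=
  let starts := PySem.List.sorted (intervals.map Prod.fst) (fun x => x) false
  let ends := PySem.List.sorted (intervals.map Prod.snd) (fun x => x) false
  pvMergeCount starts ends 0 0

-- ===== PRECONDITION & SPEC =====
def Spec_Intersection_count (N : Int) (intervals : List (Int × Int)) (out : Int) : Prop := out = Intersection_count_alt N intervals
instance (N : Int) (intervals : List (Int × Int)) (out : Int) : Decidable (Spec_Intersection_count N intervals out) := by unfold Spec_Intersection_count; infer_instance

-- ===== CLAIM (what is proved, stated in full; the proofs are below) =====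
def Claim_equal_Intersection_count : Prop := ∀ (N : Int) (intervals : List (Int × Int)), Dom_Intersection_count N intervals → Spec_Intersection_count N intervals (Intersection_count N intervals)

-- ===== LEMMAS AND PROOFS =====

-- lexicographic ≤ on pairs, the order Python's tuple sort realises
def pvBle (a b : Int × Int) : Prop := a.1 < b.1 ∨ (a.1 = b.1 ∧ a.2 ≤ b.2)

theorem pvBle_antisymm (a b : Int × Int) : pvBle a b → pvBle b a → a = b := by
  unfold pvBle
  intro h1 h2
  have : a.1 = b.1 ∧ a.2 = b.2 := by omega
  exact Prod.ext this.1 this.2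

-- the boolean comparator sorted2 uses, and its relation to pvBle
def pvLt (a b : Int × Int) : Bool :=
  decide (a.1 < b.1) || !decide (b.1 < a.1) && decide (a.2 < b.2)

theorem pvLt_false_iff (a b : Int × Int) : pvLt a b = false ↔ pvBle b a := by
  unfold pvLt pvBle
  simp only [Bool.or_eq_false_iff, Bool.and_eq_false_iff, decide_eq_false_iff_not,
    Bool.not_eq_false', decide_eq_true_eq]
  omega

theorem pvLt_true_ble (a b : Int × Int) (h : pvLt a b = true) : pvBle a b := by
  unfold pvLt at h; unfold pvBle
  simp only [Bool.or_eq_true, Bool.and_eq_true, decide_eq_true_eq,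
    Bool.not_eq_true', decide_eq_false_iff_not] at h
  omega

-- insertBy with pvLt preserves Pairwise pvBle
theorem pairwise_insertBy (x : Int × Int) (l : List (Int × Int))
    (h : l.Pairwise pvBle) :
    (PySem.List.insertBy (fun a b => pvLt a b) x l).Pairwise pvBle := by
  induction l with
  | nil => simp [PySem.List.insertBy]
  | cons y ys ih =>
    simp only [PySem.List.insertBy]
    rcases List.pairwise_cons.mp h with ⟨hy, hys⟩
    by_cases hlt : pvLt x y = true
    · simp only [hlt, ite_true]
      refine List.pairwise_cons.mpr ⟨?_, h⟩
      intro z hz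
      have hxy : pvBle x y := pvLt_true_ble x y hlt
      rcases List.mem_cons.mp hz with rfl | hz'
      · exact hxy
      · have := hy z hz'
        unfold pvBle at *; omega
    · have hxf : pvLt x y = false := by simpa using hlt
      have hyx : pvBle y x := (pvLt_false_iff x y).mp hxf
      simp only [hlt]
      refine List.pairwise_cons.mpr ⟨?_, ih hys⟩
      intro z hz
      rcases (PySem.List.mem_insertBy (fun a b => pvLt a b) x z ys).mp hz with rfl | hz'
      · exact hyx
      · exact hy z hz'

theorem pairwise_foldl_insertBy (xs : List (Int × Int)) (acc : List (Int × Int))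
    (h : acc.Pairwise pvBle) :
    (xs.foldl (fun acc x => PySem.List.insertBy (fun a b => pvLt a b) x acc) acc).Pairwise pvBle := by
  induction xs generalizing acc with
  | nil => simpa
  | cons x xs ih => exact ih _ (pairwise_insertBy x acc h)

theorem sorted2_pairwise (xs : List (Int × Int)) :
    (PySem.List.sorted2 xs Prod.fst Prod.snd false).Pairwise pvBle := by
  have h : PySem.List.sorted2 xs Prod.fst Prod.snd false
      = xs.foldl (fun acc x => PySem.List.insertBy (fun a b => pvLt a b) x acc) [] := rfl
  rw [h]
  exact pairwise_foldl_insertBy xs [] (by simp)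

-- the tagged merge: the event sequence B's two-pointer loop traverses
def pvMergeT : List Int → List Int → List (Int × Int)
  | [], [] => []
  | [], e :: es' => (e, -1) :: pvMergeT [] es'
  | s :: ss', [] => (s, 1) :: pvMergeT ss' []
  | s :: ss', e :: es' =>
      if e ≤ s then (e, -1) :: pvMergeT (s :: ss') es'
      else (s, 1) :: pvMergeT ss' (e :: es')
  termination_by ss es => ss.length + es.length

-- B's loop equals A's sweep body folded over the tagged merge
theorem mergeCount_eq_foldl (ss es : List Int) (o i : Int) :
    pvMergeCount ss es o i
      = ((pvMergeT ss es).foldl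
          (fun (st : Int × Int) ev =>
            let o := st.2 + ev.2
            (if o > 1 then st.1 + 1 else st.1, o)) (i, o)).1 := by
  fun_induction pvMergeT ss es generalizing o i with
  | case1 => simp [pvMergeCount]
  | case2 e es' ih =>
    simp only [pvMergeCount, List.foldl_cons]
    rw [ih]
    have h : o - 1 = o + -1 := by ring
    rw [h]
  | case3 s ss' ih =>
    simp only [pvMergeCount, List.foldl_cons]
    rw [ih]
  | case4 s ss' e es' hle ih =>
    simp only [pvMergeCount, if_pos hle, List.foldl_cons]
    rw [ih]
    have h : o - 1 = o + -1 := by ring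
    rw [h]
  | case5 s ss' e es' hle ih =>
    simp only [pvMergeCount, if_neg hle, List.foldl_cons]
    rw [ih]

-- the tagged merge is a permutation of the tagged concatenation
theorem mergeT_perm (ss es : List Int) :
    (pvMergeT ss es).Perm
      (ss.map (fun x => (x, (1 : Int))) ++ es.map (fun x => (x, (-1 : Int)))) := by
  fun_induction pvMergeT ss es with
  | case1 => simp
  | case2 e es' ih => simpa using ih.cons ((e, (-1 : Int)))
  | case3 s ss' ih => simpa using ih.cons ((s, (1 : Int)))
  | case4 s ss' e es' hle ih =>
    refine (ih.cons ((e, (-1 : Int)))).trans ?_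
    simp only [List.map_cons]
    exact List.perm_middle.symm
  | case5 s ss' e es' hle ih => simpa using ih.cons ((s, (1 : Int)))

theorem mem_mergeT {ss es : List Int} {z : Int × Int} (hz : z ∈ pvMergeT ss es) :
    (z.2 = 1 ∧ z.1 ∈ ss) ∨ (z.2 = -1 ∧ z.1 ∈ es) := by
  have h := (mergeT_perm ss es).mem_iff.mp hz
  simp only [List.mem_append, List.mem_map] at h
  rcases h with ⟨a, ha, rfl⟩ | ⟨a, ha, rfl⟩
  · exact Or.inl ⟨rfl, ha⟩
  · exact Or.inr ⟨rfl, ha⟩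

-- sortedness of the tagged merge from sortedness of the two inputs
theorem mergeT_pairwise (ss es : List Int)
    (hs : ss.Pairwise (· ≤ ·)) (he : es.Pairwise (· ≤ ·)) :
    (pvMergeT ss es).Pairwise pvBle := by
  fun_induction pvMergeT ss es with
  | case1 => simp
  | case2 e es' ih =>
    rcases List.pairwise_cons.mp he with ⟨he1, he2⟩
    refine List.pairwise_cons.mpr ⟨?_, ih hs he2⟩
    intro z hz
    rcases mem_mergeT hz with ⟨h2, h1⟩ | ⟨h2, h1⟩
    · exact absurd h1 (List.not_mem_nil)
    · have := he1 z.1 h1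
      unfold pvBle; omega
  | case3 s ss' ih =>
    rcases List.pairwise_cons.mp hs with ⟨hs1, hs2⟩
    refine List.pairwise_cons.mpr ⟨?_, ih hs2 he⟩
    intro z hz
    rcases mem_mergeT hz with ⟨h2, h1⟩ | ⟨h2, h1⟩
    · have := hs1 z.1 h1
      unfold pvBle; omega
    · exact absurd h1 (List.not_mem_nil)
  | case4 s ss' e es' hle ih =>
    rcases List.pairwise_cons.mp he with ⟨he1, he2⟩
    refine List.pairwise_cons.mpr ⟨?_, ih hs he2⟩
    intro z hz
    rcases mem_mergeT hz with ⟨h2, h1⟩ | ⟨h2, h1⟩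
    · rcases List.mem_cons.mp h1 with rfl | h1'
      · unfold pvBle; omega
      · have := (List.pairwise_cons.mp hs).1 z.1 h1'
        unfold pvBle; omega
    · have := he1 z.1 h1
      unfold pvBle; omega
  | case5 s ss' e es' hle ih =>
    rcases List.pairwise_cons.mp hs with ⟨hs1, hs2⟩
    refine List.pairwise_cons.mpr ⟨?_, ih hs2 he⟩
    intro z hz
    rcases mem_mergeT hz with ⟨h2, h1⟩ | ⟨h2, h1⟩
    · have := hs1 z.1 h1
      unfold pvBle; omega
    · rcases List.mem_cons.mp h1 with rfl | h1'
      · unfold pvBle; omega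
      · have := (List.pairwise_cons.mp he).1 z.1 h1'
        unfold pvBle; omega

-- A's endpoints list, closed form of the append fold
theorem endpoints_eq (intervals : List (Int × Int)) :
    intervals.foldl (fun acc iv => acc ++ [(iv.1, (1 : Int)), (iv.2, -1)]) []
      = intervals.flatMap (fun iv => [(iv.1, 1), (iv.2, -1)]) := by
  have h : ∀ (l : List (Int × Int)) (acc : List (Int × Int)),
      l.foldl (fun acc iv => acc ++ [(iv.1, (1 : Int)), (iv.2, -1)]) acc
        = acc ++ l.flatMap (fun iv => [(iv.1, 1), (iv.2, -1)]) := by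
    intro l
    induction l with
    | nil => simp
    | cons x xs ih => intro acc; simp [ih]
  simpa using h intervals []

theorem endpoints_perm (intervals : List (Int × Int)) :
    (intervals.flatMap (fun iv => [(iv.1, (1 : Int)), (iv.2, -1)])).Perm
      ((intervals.map Prod.fst).map (fun x => (x, (1 : Int)))
        ++ (intervals.map Prod.snd).map (fun x => (x, (-1 : Int)))) := by
  induction intervals with
  | nil => simp
  | cons x xs ih =>
    simp only [List.flatMap_cons, List.map_cons, List.cons_append, List.nil_append]
    refine ((ih.cons ((x.2, (-1 : Int)))).cons ((x.1, (1 : Int)))).trans ?_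
    exact List.Perm.cons _ List.perm_middle.symm

-- the two sorted event sequences coincide
theorem sorted2_eq_mergeT (intervals : List (Int × Int)) :
    PySem.List.sorted2
        (intervals.foldl (fun acc iv => acc ++ [(iv.1, (1 : Int)), (iv.2, -1)]) [])
        Prod.fst Prod.snd false
      = pvMergeT (PySem.List.sorted (intervals.map Prod.fst) (fun x => x) false)
                 (PySem.List.sorted (intervals.map Prod.snd) (fun x => x) false) := by
  set ss := PySem.List.sorted (intervals.map Prod.fst) (fun x => x) false with hss
  set es := PySem.List.sorted (intervals.map Prod.snd) (fun x => x) false with hes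
  have hsp : ss.Pairwise (· ≤ ·) := by
    have h := PySem.List.sorted_pairwise (xs := intervals.map Prod.fst) (key := fun x => x)
    simpa [hss] using h
  have hep : es.Pairwise (· ≤ ·) := by
    have h := PySem.List.sorted_pairwise (xs := intervals.map Prod.snd) (key := fun x => x)
    simpa [hes] using h
  set E := intervals.foldl (fun acc iv => acc ++ [(iv.1, (1 : Int)), (iv.2, -1)]) [] with hE
  have hperm : (pvMergeT ss es).Perm E := by
    have h1 := mergeT_perm ss es
    have h2 : (ss.map (fun x => (x, (1 : Int))) ++ es.map (fun x => (x, (-1 : Int)))).Perm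
        ((intervals.map Prod.fst).map (fun x => (x, (1 : Int)))
          ++ (intervals.map Prod.snd).map (fun x => (x, (-1 : Int)))) :=
      List.Perm.append
        ((PySem.List.sorted_perm (intervals.map Prod.fst) (fun x => x) false).map _)
        ((PySem.List.sorted_perm (intervals.map Prod.snd) (fun x => x) false).map _)
    have h3 := (endpoints_perm intervals).symm
    rw [hE, endpoints_eq]
    exact (h1.trans h2).trans h3
  have hperm2 : (PySem.List.sorted2 E Prod.fst Prod.snd false).Perm (pvMergeT ss es) :=
    (PySem.List.sorted2_perm E Prod.fst Prod.snd false).trans hperm.symm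
  exact List.Perm.eq_of_pairwise
    (fun a b _ _ hab hba => pvBle_antisymm a b hab hba)
    (sorted2_pairwise E) (mergeT_pairwise ss es hsp hep) hperm2

-- ===== VERDICT (by name: the statement is the Claim_ definition above) =====
theorem Intersection_count_spec : Claim_equal_Intersection_count := by
  intro N intervals _
  unfold Spec_Intersection_count
  have hA : Intersection_count N intervals
      = ((PySem.List.sorted2
            (intervals.foldl (fun acc iv => acc ++ [(iv.1, (1 : Int)), (iv.2, -1)]) [])
            Prod.fst Prod.snd false).foldl
          (fun (st : Int × Int) ev =>
            let o := st.2 + ev.2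
            (if o > 1 then st.1 + 1 else st.1, o)) (0, 0)).1 := rfl
  have hB : Intersection_count_alt N intervals
      = pvMergeCount (PySem.List.sorted (intervals.map Prod.fst) (fun x => x) false)
          (PySem.List.sorted (intervals.map Prod.snd) (fun x => x) false) 0 0 := rfl
  rw [hA, hB, sorted2_eq_mergeT, mergeCount_eq_foldl]
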